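-- pv_equiv track=rewrite | github.com/wanglongjiang/leetcode | medium/1807-evaluate-the-bracket-pairs-of-a-string.py | evaluate
-- ===== SOURCE A (Python) =====
-- from typing import List
--
-- def evaluate(s: str, knowledge: List[List[str]]) -> str:
--     d = {}
--     for word in knowledge:
--         d[word[0]] = word[1]
--     ans = []
--     i, n = 0, len(s)
--     while i < n:
--         while i < n and s[i] != '(':
--             ans.append(s[i])
--             i += 1
--         if i < n:
--             i += 1
--             j = i
--             while s[i] != ')':
--                 i += 1
--             var = s[j:i]
--             if var in d:
--                 ans.append(d[var])
--             else:
--                 ans.append('?')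
--             i += 1
--     return ''.join(ans)
-- ===== SOURCE B (Python) =====
-- from typing import List
--
-- def evaluate(s: str, knowledge: List[List[str]]) -> str:
--     d = {w[0]: w[1] for w in knowledge}
--     out = []
--     key = None  # None = copying mode; a list = collecting a bracketed key
--     for c in s:
--         if key is None:
--             if c == '(':
--                 key = []
--             else:
--                 out.append(c)
--         elif c == ')':
--             out.append(d.get(''.join(key), '?'))
--             key = None
--         else:
--             key.append(c)
--     return ''.join(out)
-- ===== Notes on version B (the rewrite author's own statement) =====
-- stated objective: alternative
-- what changed: A's two-level index-based scanner (nested while loops, slicing s[j:i]) is replaced by a single flat state-machine pass over the characters: a fold whose state is the output plus an optional key buffer, with no indices or slices.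
import Mathlib
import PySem

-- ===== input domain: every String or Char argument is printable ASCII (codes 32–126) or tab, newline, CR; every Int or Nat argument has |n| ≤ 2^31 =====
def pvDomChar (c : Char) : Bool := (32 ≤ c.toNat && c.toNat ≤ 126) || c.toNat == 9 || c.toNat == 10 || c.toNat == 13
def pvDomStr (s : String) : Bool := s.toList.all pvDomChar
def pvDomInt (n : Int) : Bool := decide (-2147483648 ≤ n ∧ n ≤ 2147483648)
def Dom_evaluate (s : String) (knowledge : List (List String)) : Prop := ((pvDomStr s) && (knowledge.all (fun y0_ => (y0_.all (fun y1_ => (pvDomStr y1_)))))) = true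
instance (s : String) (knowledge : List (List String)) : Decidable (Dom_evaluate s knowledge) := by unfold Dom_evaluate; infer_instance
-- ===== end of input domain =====

-- B replaces A's nested index-based scanner with a single state-machine fold (same cost); A = B wherever A returns.

-- ===== PORT A =====
-- shared by both ports: 'd[word[0]] = word[1]' over knowledge (A's loop; B's dict comprehension is the same fold).
-- A word of length < 2 makes Python raise IndexError — excluded by Pre_; the port skips it.
def buildDict (knowledge : List (List String)) : PySem.Dict (List Char) (List Char) :=
  knowledge.foldl (fun d w =>
    match w with
    | k :: v :: _ => d.insert k.toList v.toList
    | _ => d) PySem.Dict.empty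

-- inner "while s[i] != ')': i += 1" of A: first index ≥ i holding ')'; none = ran off the end (Python IndexError)
def scanClose (cs : List Char) (i : Nat) : Option Nat :=
  if h : i < cs.length then
    if cs[i] = ')' then some i else scanClose cs (i + 1)
  else none
termination_by cs.length - i

-- bounds needed by loopA's termination argument
theorem scanClose_bounds (cs : List Char) : ∀ n i j : Nat, cs.length - i ≤ n → scanClose cs i = some j → i ≤ j ∧ j < cs.length := by
  intro n
  induction n with
  | zero =>
    intro i j hle hj
    unfold scanClose at hj
    have : ¬ i < cs.length := by omega
    simp [this] at hj
  | succ n ih =>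
    intro i j hle hj
    unfold scanClose at hj
    by_cases h : i < cs.length
    · simp only [dif_pos h] at hj
      by_cases hc : cs[i] = ')'
      · simp [hc] at hj; omega
      · simp only [if_neg hc] at hj
        have := ih (i + 1) j (by omega) hj
        omega
    · simp [h] at hj

-- outer while of A: i and ans are the loop state (ans flattened to chars; ''.join(ans) at the end)
def loopA (cs : List Char) (d : PySem.Dict (List Char) (List Char)) (i : Nat) (acc : List Char) : List Char :=
  if h : i < cs.length then
    if hc : cs[i] = '(' then
      match hj : scanClose cs (i + 1) with
      | some j =>
          loopA cs d (j + 1) (acc ++ d.getD ((cs.drop (i + 1)).take (j - (i + 1))) ['?'])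
      | none => acc   -- Python raises IndexError here (excluded by Pre_)
    else
      loopA cs d (i + 1) (acc ++ [cs[i]])
  else acc
termination_by cs.length - i
decreasing_by
  · have := scanClose_bounds cs cs.length (i + 1) j (by omega) hj; omega
  · omega

def evaluate (s : String) (knowledge : List (List String)) : String :=
  String.ofList (loopA s.toList (buildDict knowledge) 0 [])

-- ===== PORT B =====
-- one step of B's for-loop: state = (out so far, optional key buffer)
def stepB (d : PySem.Dict (List Char) (List Char)) (st : List Char × Option (List Char)) (c : Char) :
    List Char × Option (List Char) :=
  match st.2 with
  | none => if c = '(' then (st.1, some []) else (st.1 ++ [c], none)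
  | some key => if c = ')' then (st.1 ++ d.getD key ['?'], none) else (st.1, some (key ++ [c]))

def evaluate_alt (s : String) (knowledge : List (List String)) : String :=
  String.ofList (s.toList.foldl (stepB (buildDict knowledge)) ([], none)).1

-- ===== PRECONDITION & SPEC =====
-- Pre_ is exactly where Python A returns: every knowledge entry has ≥ 2 fields (word[0], word[1] exist)
-- and every '(' in s is followed by a later ')' (otherwise A's inner scan runs off the end: IndexError).
def Pre_evaluate (s : String) (knowledge : List (List String)) : Prop :=
  (∀ w ∈ knowledge, 2 ≤ w.length) ∧
  ∀ i < s.toList.length, s.toList[i]? = some '(' →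
    ∃ j < s.toList.length, i < j ∧ s.toList[j]? = some ')'
instance (s : String) (knowledge : List (List String)) : Decidable (Pre_evaluate s knowledge) := by
  unfold Pre_evaluate; infer_instance

def pvWitness_evaluate : String × List (List String) := ("(a)x(b)", [["a", "yes"], ["c", "no"]])

def Spec_evaluate (s : String) (knowledge : List (List String)) (out : String) : Prop := out = evaluate_alt s knowledge
instance (s : String) (knowledge : List (List String)) (out : String) : Decidable (Spec_evaluate s knowledge out) := by unfold Spec_evaluate; infer_instance

-- ===== CLAIM (what is proved, stated in full; the proofs are below) =====
def Claim_equal_evaluate : Prop := ∀ (s : String) (knowledge : List (List String)), Dom_evaluate s knowledge → Pre_evaluate s knowledge → Spec_evaluate s knowledge (evaluate s knowledge)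

-- ===== LEMMAS AND PROOFS =====

-- well-formedness of the remaining text: every '(' still has a later ')'
def WfL (t : List Char) : Prop := ∀ u v : List Char, t = u ++ '(' :: v → ')' ∈ v

theorem wfL_tail (c : Char) (t : List Char) (h : WfL (c :: t)) : WfL t := by
  intro u v huv
  exact h (c :: u) v (by rw [huv]; rfl)

theorem pre_wf (cs : List Char)
    (h : ∀ i < cs.length, cs[i]? = some '(' → ∃ j < cs.length, i < j ∧ cs[j]? = some ')') :
    WfL cs := by
  intro u v huv
  have hlen : u.length < cs.length := by rw [huv]; simp
  have hget : cs[u.length]? = some '(' := by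
    rw [huv, List.getElem?_append_right (le_refl u.length)]
    simp
  obtain ⟨j, hjlen, hij, hj⟩ := h u.length hlen hget
  have hj' : cs[j]? = ('(' :: v)[j - u.length]? := by
    rw [huv, List.getElem?_append_right (by omega)]
  have hk : ('(' :: v)[j - u.length]? = v[j - u.length - 1]? := by
    rcases Nat.exists_eq_add_of_lt hij with ⟨k, hk⟩
    have : j - u.length = k + 1 := by omega
    rw [this]; simp
  have : v[j - u.length - 1]? = some ')' := by rw [← hk, ← hj', hj]
  exact List.mem_of_getElem? this

-- scanClose finds the first ')' : its index is i + length of the ')'-free prefix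
theorem scanClose_mem (cs : List Char) :
    ∀ n i, cs.length - i ≤ n → ')' ∈ cs.drop i →
      scanClose cs i = some (i + ((cs.drop i).takeWhile (· != ')')).length) := by
  intro n
  induction n with
  | zero =>
    intro i hle hmem
    have : cs.length ≤ i := by omega
    rw [List.drop_eq_nil_of_le this] at hmem
    simp at hmem
  | succ n ih =>
    intro i hle hmem
    by_cases h : i < cs.length
    · have hdrop : cs.drop i = cs[i] :: cs.drop (i + 1) := List.drop_eq_getElem_cons h
      unfold scanClose
      rw [dif_pos h]
      by_cases hc : cs[i] = ')'
      · rw [if_pos hc]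
        have ht : (cs.drop i).takeWhile (· != ')') = [] := by
          rw [hdrop]
          apply List.takeWhile_cons_of_neg
          simp [hc]
        rw [ht]
        simp
      · rw [if_neg hc]
        have hmem' : ')' ∈ cs.drop (i + 1) := by
          rw [hdrop] at hmem
          rcases List.mem_cons.mp hmem with h1 | h1
          · exact absurd h1.symm hc
          · exact h1
        rw [ih (i + 1) (by omega) hmem', hdrop]
        rw [List.takeWhile_cons_of_pos (by simp [hc])]
        simp; omega
    · have : cs.length ≤ i := by omega
      rw [List.drop_eq_nil_of_le this] at hmem
      simp at hmem

theorem foldKey (d : PySem.Dict (List Char) (List Char)) :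
    ∀ (key rest acc : List Char) (buf : List Char), (∀ c ∈ key, (c != ')') = true) →
      List.foldl (stepB d) (acc, some buf) (key ++ rest) = List.foldl (stepB d) (acc, some (buf ++ key)) rest := by
  intro key
  induction key with
  | nil => intro rest acc buf _; simp
  | cons c key ih =>
    intro rest acc buf hp
    have hc : ¬ c = ')' := by
      have := hp c (List.mem_cons_self)
      simp at this; exact this
    simp only [List.cons_append, List.foldl_cons]
    have hstep : stepB d (acc, some buf) c = (acc, some (buf ++ [c])) := by
      simp [stepB, hc]
    rw [hstep, ih rest acc (buf ++ [c]) (fun x hx => hp x (List.mem_cons_of_mem _ hx))]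
    simp

theorem loopA_eq_fold (cs : List Char) (d : PySem.Dict (List Char) (List Char)) :
    ∀ n i acc, cs.length - i ≤ n → WfL (cs.drop i) →
      loopA cs d i acc = (List.foldl (stepB d) (acc, none) (cs.drop i)).1 := by
  intro n
  induction n with
  | zero =>
    intro i acc hle _
    have hge : cs.length ≤ i := by omega
    rw [List.drop_eq_nil_of_le hge]
    unfold loopA
    rw [dif_neg (by omega)]
    rfl
  | succ n ih =>
    intro i acc hle hwf
    by_cases h : i < cs.length
    · have hdrop : cs.drop i = cs[i] :: cs.drop (i + 1) := List.drop_eq_getElem_cons h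
      by_cases hc : cs[i] = '('
      · -- bracket case
        have hmem : ')' ∈ cs.drop (i + 1) := by
          have := hwf [] (cs.drop (i + 1)) (by rw [hdrop, hc]; rfl)
          simpa using this
        have hrne : (cs.drop (i + 1)).dropWhile (· != ')') ≠ [] := by
          intro h0
          rw [List.dropWhile_eq_nil_iff] at h0
          have := h0 _ hmem
          simp at this
        have hhead : ((cs.drop (i + 1)).dropWhile (· != ')')).head hrne = ')' := by
          have := List.head_dropWhile_not (· != ')') hrne
          simpa using this
        have hdw : (cs.drop (i + 1)).dropWhile (· != ')') = ')' :: ((cs.drop (i + 1)).dropWhile (· != ')')).tail := by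
          conv_lhs => rw [← List.cons_head_tail hrne, hhead]
        have hsplit : cs.drop (i + 1) =
            (cs.drop (i + 1)).takeWhile (· != ')') ++ ')' :: ((cs.drop (i + 1)).dropWhile (· != ')')).tail := by
          conv_lhs => rw [← List.takeWhile_append_dropWhile (p := (· != ')')) (l := cs.drop (i + 1)), hdw]
        set key := (cs.drop (i + 1)).takeWhile (· != ')') with hkeydef
        set tl := ((cs.drop (i + 1)).dropWhile (· != ')')).tail with htldef
        have hscan : scanClose cs (i + 1) = some (i + 1 + key.length) :=
          scanClose_mem cs cs.length (i + 1) (by omega) hmem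
        have hvar : (cs.drop (i + 1)).take (i + 1 + key.length - (i + 1)) = key := by
          have heq : i + 1 + key.length - (i + 1) = key.length := by omega
          rw [heq]
          exact (List.prefix_iff_eq_take.mp (List.takeWhile_prefix _)).symm
        have hdropj : cs.drop (i + 1 + key.length + 1) = tl := by
          rw [show i + 1 + key.length + 1 = (i + 1) + (key.length + 1) by omega, ← List.drop_drop]
          conv_lhs => rw [hsplit]
          rw [show key ++ ')' :: tl = (key ++ [')']) ++ tl by simp]
          rw [show key.length + 1 = (key ++ [')']).length by simp]
          exact List.drop_left
        have hjlt : i + 1 + key.length < cs.length := by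
          have := scanClose_bounds cs cs.length (i + 1) (i + 1 + key.length) (by omega) hscan
          omega
        have hwf' : WfL (cs.drop (i + 1 + key.length + 1)) := by
          rw [hdropj]
          intro u v huv
          refine hwf ('(' :: key ++ ')' :: u) v ?_
          rw [hdrop, hc]
          conv_lhs => rw [hsplit]
          rw [huv]; simp
        -- unfold loopA once
        rw [loopA, dif_pos h, dif_pos hc]
        split
        case _ j hj =>
          rw [hscan] at hj
          injection hj with hj
          subst hj
          rw [hvar]
          rw [ih (i + 1 + key.length + 1) _ (by omega) hwf']
          -- fold side
          conv_rhs => rw [hdrop, hc]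
          conv_rhs => rw [hsplit]
          simp only [List.foldl_cons]
          have hstep1 : stepB d (acc, none) '(' = (acc, some []) := by simp [stepB]
          rw [hstep1]
          have hkp : ∀ c ∈ key, (c != ')') = true := by
            intro c hcmem
            have h1 : c ∈ (cs.drop (i + 1)).takeWhile (· != ')') := hkeydef ▸ hcmem
            simpa using List.mem_takeWhile_imp h1
          rw [show (key ++ ')' :: tl : List Char) = key ++ (')' :: tl) from rfl]
          rw [foldKey d key (')' :: tl) acc [] hkp]
          simp only [List.foldl_cons, List.nil_append]
          have hstep2 : stepB d (acc, some key) ')' = (acc ++ d.getD key ['?'], none) := by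
            simp [stepB]
          rw [hstep2, hdropj]
        case _ hj =>
          rw [hscan] at hj
          exact absurd hj (by simp)
      · -- plain character case
        rw [loopA, dif_pos h, dif_neg hc]
        rw [ih (i + 1) _ (by omega) (by
          have := hwf
          rw [hdrop] at this
          exact wfL_tail _ _ this)]
        conv_rhs => rw [hdrop]
        simp only [List.foldl_cons]
        have hstep : stepB d (acc, none) cs[i] = (acc ++ [cs[i]], none) := by
          simp [stepB, hc]
        rw [hstep]
    · have hge : cs.length ≤ i := by omega
      rw [List.drop_eq_nil_of_le hge]
      unfold loopA
      rw [dif_neg (by omega)]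
      rfl

-- ===== VERDICT (by name: the statement is the Claim_ definition above) =====
theorem evaluate_spec : Claim_equal_evaluate := by
  intro s knowledge _ hpre
  unfold Spec_evaluate evaluate evaluate_alt
  congr 1
  have := loopA_eq_fold s.toList (buildDict knowledge) s.toList.length 0 [] (by omega)
    (by simpa using pre_wf s.toList hpre.2)
  simpa using this
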